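-- pv_equiv track=rewrite | github.com/Hclover2003/finding_hidden_messages_in_dna | week3/1. motif_enumerate.py | motif_enumerate
-- ===== SOURCE A (Python) =====
-- def hamming_distance(p, q):
--     k = len(p)
--     hamd = 0
--     for i in range(k):
--         if p[i] != q[i]:
--             hamd += 1
--     return hamd
--
-- def neighbors(pattern, d):
--     # if exact match, return pattern
--     if d == 0:
--         return [pattern]
--     # if length 1, neighbors are each of the 4 nucleotides
--     if len(pattern) == 1:
--         return ['A', 'C', 'G', 'T']
--     neighbourhood = []
--     suffix = pattern[1:]
--     # strings that differ from pattern[i:] by d or less mismatches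
--     suffix_neighbours = neighbors(suffix, d)
--     # for each string in the neighbours of the given pattern - 1
--     for text in suffix_neighbours:
--         # if differs from string by at most 1 less than d
--         if hamming_distance(suffix, text) < d:
--             # adds a prefix to the pattern, adds to the pattern neighbourhood
--             for i in ['A', 'C', 'G', 'T']:
--                 neighbourhood.append(i+text)
--         # if differs from string by d, just add it to the neighbourhood with exact match for first letter
--         else:
--             neighbourhood.append(pattern[0]+text)
--     return neighbourhood
--
-- def motif_enumerate(dna_list, k, d):
--     kmer_set = [set() for _ in range(len(dna_list))]
--     for x in range(len(dna_list)):
--         dna = dna_list[x]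
--         for i in range(len(dna)-k+1):
--             kmer = dna[i:i+k]
--             kmer_neighbors = neighbors(kmer, d)
--             for neighbor in kmer_neighbors:
--                 if neighbor not in kmer_set[x]:
--                     kmer_set[x].add(neighbor)
--     return kmer_set
-- ===== SOURCE B (Python) =====
-- def motif_enumerate(dna_list, k, d):
--     # Same per-string neighbourhood sets as the original, but the recursive
--     # `neighbors` is replaced by an iterative right-to-left sweep that threads a
--     # running mismatch count with each candidate, so the O(k) hamming_distance
--     # rescan per candidate per level disappears.
--     result = []
--     for dna in dna_list:
--         seen = set()
--         for i in range(len(dna) - k + 1):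
--             kmer = dna[i:i + k]
--             for nb in _neighbors_iter(kmer, d):
--                 seen.add(nb)
--         result.append(seen)
--     return result
--
--
-- def _neighbors_iter(pattern, d):
--     if d == 0:
--         return [pattern]
--     # candidates for the final character, paired with their mismatch count
--     cur = [(c, 0 if c == pattern[-1] else 1) for c in 'ACGT']
--     for pc in reversed(pattern[:-1]):
--         nxt = []
--         for text, dist in cur:
--             if dist < d:
--                 for c in 'ACGT':
--                     nxt.append((c + text, dist + (c != pc)))
--             else:
--                 nxt.append((pc + text, dist))
--         cur = nxt
--     return [t for t, _ in cur]
-- ===== Notes on version B (the rewrite author's own statement) =====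
-- stated objective: faster
-- what changed: Replaces the top-down recursive neighbors (which recomputes hamming_distance(suffix, text) for every candidate at every recursion level) with an iterative right-to-left sweep that threads a running mismatch count with each candidate, building each window's neighbourhood bottom-up with no recursion and no distance rescans.
import Mathlib
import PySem

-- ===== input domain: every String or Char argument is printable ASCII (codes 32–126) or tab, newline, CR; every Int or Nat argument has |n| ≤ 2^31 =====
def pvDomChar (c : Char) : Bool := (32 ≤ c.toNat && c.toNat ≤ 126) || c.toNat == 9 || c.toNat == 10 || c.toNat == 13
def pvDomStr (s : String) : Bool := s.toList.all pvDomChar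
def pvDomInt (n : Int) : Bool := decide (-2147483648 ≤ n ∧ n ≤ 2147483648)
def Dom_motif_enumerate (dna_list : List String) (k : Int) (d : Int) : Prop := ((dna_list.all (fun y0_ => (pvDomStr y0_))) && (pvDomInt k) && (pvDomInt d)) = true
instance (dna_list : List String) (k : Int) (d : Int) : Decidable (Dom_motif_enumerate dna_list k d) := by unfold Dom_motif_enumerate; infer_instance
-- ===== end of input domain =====

-- B replaces the top-down recursive `neighbors` (which rescans hamming_distance for every
-- candidate at every level) by an iterative right-to-left sweep threading a running mismatch
-- count with each candidate; measured faster (objective: faster).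

-- ===== PORT A =====
-- hamming_distance(p, q); exact for |q| ≥ |p| (the only calls made: equal lengths)
def pvHam (p q : List Char) : Int :=
  (p.zip q).foldl (fun hamd pq => if pq.1 != pq.2 then hamd + 1 else hamd) 0

-- neighbors(pattern, d); on pattern = '' with d ≠ 0 Python recurses forever
-- (RecursionError) — those inputs are excluded by Pre_ below; the port returns [] there.
def neighborsA (pattern : List Char) (d : Int) : List (List Char) :=
  if d = 0 then [pattern]
  else
    match pattern with
    | [] => []
    | [_] => [['A'], ['C'], ['G'], ['T']]
    | p0 :: suffix =>
      (neighborsA suffix d).foldl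
        (fun nbh text =>
          if pvHam suffix text < d then
            nbh ++ (['A', 'C', 'G', 'T'].map fun i => i :: text)
          else
            nbh ++ [p0 :: text])
        []

-- the x-indexed loop writes only into kmer_set[x], so it is the per-element map below
def motif_enumerate (dna_list : List String) (k : Int) (d : Int) : List (List String) :=
  dna_list.map (fun dna =>
    (PySem.List.pyRange 0 ((dna.toList.length : Int) - k + 1) 1).foldl
      (fun kset i =>
        (neighborsA (PySem.List.slice dna.toList (some i) (some (i + k))) d).foldl
          (fun s neighbor =>
            if PySem.Set.contains s (String.ofList neighbor) then s
            else PySem.Set.add s (String.ofList neighbor))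
          kset)
      (PySem.Set.empty : PySem.Set String))

-- ===== PORT B =====
-- one level of B's sweep: extend every (text, dist) candidate by the pattern character pc
def stepB (d : Int) (pc : Char) (cur : List (List Char × Int)) : List (List Char × Int) :=
  cur.foldl
    (fun nxt td =>
      if td.2 < d then
        nxt ++ (['A', 'C', 'G', 'T'].map fun c => (c :: td.1, td.2 + (if c != pc then 1 else 0)))
      else
        nxt ++ [(pc :: td.1, td.2)])
    []

-- the candidate list after sweeping the whole pattern (cur after B's for-loop);
-- pattern[-1] raises IndexError on the empty pattern (excluded by Pre_): [] there
def levelB (pattern : List Char) (d : Int) : List (List Char × Int) :=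
  match pattern.getLast? with
  | none => []
  | some last =>
    pattern.dropLast.reverse.foldl (fun cur pc => stepB d pc cur)
      (['A', 'C', 'G', 'T'].map fun c => ([c], if c = last then (0 : Int) else 1))

def neighborsB (pattern : List Char) (d : Int) : List (List Char) :=
  if d = 0 then [pattern]
  else (levelB pattern d).map (fun td => td.1)

def motif_enumerate_alt (dna_list : List String) (k : Int) (d : Int) : List (List String) :=
  dna_list.map (fun dna =>
    (PySem.List.pyRange 0 ((dna.toList.length : Int) - k + 1) 1).foldl
      (fun seen i =>
        (neighborsB (PySem.List.slice dna.toList (some i) (some (i + k))) d).foldl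
          (fun s nb => PySem.Set.add s (String.ofList nb))
          seen)
      (PySem.Set.empty : PySem.Set String))

-- ===== PRECONDITION & SPEC =====
-- Pre_ excludes exactly the raising inputs: with k ≤ 0, d ≠ 0 and a nonempty dna_list every
-- window's k-mer is '', on which A's recursive neighbors never terminates (RecursionError)
-- and B raises IndexError at pattern[-1].
def Pre_motif_enumerate (dna_list : List String) (k : Int) (d : Int) : Prop :=
  1 ≤ k ∨ d = 0 ∨ dna_list = []
instance (dna_list : List String) (k : Int) (d : Int) : Decidable (Pre_motif_enumerate dna_list k d) := by unfold Pre_motif_enumerate; infer_instance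
def pvWitness_motif_enumerate : List String × Int × Int := (["ACGT"], 2, 1)

def Spec_motif_enumerate (dna_list : List String) (k : Int) (d : Int) (out : List (List String)) : Prop := out = motif_enumerate_alt dna_list k d
instance (dna_list : List String) (k : Int) (d : Int) (out : List (List String)) : Decidable (Spec_motif_enumerate dna_list k d out) := by unfold Spec_motif_enumerate; infer_instance

-- ===== CLAIM (what is proved, stated in full; the proofs are below) =====
def Claim_equal_motif_enumerate : Prop := ∀ (dna_list : List String) (k : Int) (d : Int), Dom_motif_enumerate dna_list k d → Pre_motif_enumerate dna_list k d → Spec_motif_enumerate dna_list k d (motif_enumerate dna_list k d)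

-- ===== LEMMAS AND PROOFS =====

theorem pvHam_eq_countP (p q : List Char) :
    pvHam p q = ((p.zip q).countP (fun pq => pq.1 != pq.2) : Nat) := by
  unfold pvHam
  rw [PySem.List.foldl_count_if]
  simp

theorem pvHam_cons (a b : Char) (p q : List Char) :
    pvHam (a :: p) (b :: q) = (if a != b then 1 else 0) + pvHam p q := by
  rw [pvHam_eq_countP, pvHam_eq_countP, List.zip_cons_cons, List.countP_cons]
  by_cases h : a = b
  · simp [h]
  · simp [h]
    ring

-- the invariant of B's sweep: fst-projections follow A's recursion, snd is the hamming
-- distance of the candidate to the pattern suffix it covers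
theorem stepB_go (d : Int) (p0 : Char) (s : List Char) :
    ∀ (cur : List (List Char × Int)) (accB : List (List Char × Int)),
      (∀ td ∈ cur, td.2 = pvHam s td.1) →
      (List.foldl
          (fun nxt td =>
            if td.2 < d then
              nxt ++ (['A', 'C', 'G', 'T'].map fun c => (c :: td.1, td.2 + (if c != p0 then 1 else 0)))
            else
              nxt ++ [(p0 :: td.1, td.2)])
          accB cur).map (fun td => td.1)
        = List.foldl
            (fun nbh text =>
              if pvHam s text < d then
                nbh ++ (['A', 'C', 'G', 'T'].map fun i => i :: text)
              else
                nbh ++ [p0 :: text])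
            (accB.map (fun td => td.1)) (cur.map (fun td => td.1))
      ∧ ((∀ td ∈ accB, td.2 = pvHam (p0 :: s) td.1) →
          ∀ td ∈ List.foldl
            (fun nxt td =>
              if td.2 < d then
                nxt ++ (['A', 'C', 'G', 'T'].map fun c => (c :: td.1, td.2 + (if c != p0 then 1 else 0)))
              else
                nxt ++ [(p0 :: td.1, td.2)])
            accB cur, td.2 = pvHam (p0 :: s) td.1) := by
  intro cur
  induction cur with
  | nil =>
    intro accB _
    exact ⟨rfl, fun h' td htd => h' td htd⟩
  | cons td0 rest ih =>
    intro accB hcur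
    have h0 : td0.2 = pvHam s td0.1 := hcur td0 (by simp)
    have hrest : ∀ td ∈ rest, td.2 = pvHam s td.1 := fun td h => hcur td (by simp [h])
    obtain ⟨ih1, ih2⟩ := ih
      (if td0.2 < d then
        accB ++ (['A', 'C', 'G', 'T'].map fun c => (c :: td0.1, td0.2 + (if c != p0 then 1 else 0)))
      else accB ++ [(p0 :: td0.1, td0.2)]) hrest
    constructor
    · simp only [List.foldl_cons, List.map_cons] at ih1 ⊢
      rw [ih1]
      congr 1
      rw [← h0]
      split_ifs <;> simp [List.map_append]
    · intro haccB
      rw [List.foldl_cons]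
      apply ih2
      intro td htd
      by_cases hlt : td0.2 < d
      · rw [if_pos hlt] at htd
        simp only [List.mem_append, List.mem_map] at htd
        rcases htd with htd | ⟨c, hc, rfl⟩
        · exact haccB td htd
        · simp only [pvHam_cons, ← h0]
          by_cases hcp : c = p0
          · simp [hcp]
          · have hcp' : ¬ p0 = c := fun h => hcp h.symm
            simp [hcp, hcp']
            ring
      · rw [if_neg hlt] at htd
        simp only [List.mem_append, List.mem_singleton] at htd
        rcases htd with htd | rfl
        · exact haccB td htd
        · simp [pvHam_cons, ← h0]

theorem levelB_cons (d : Int) (p0 c : Char) (rest : List Char) :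
    levelB (p0 :: c :: rest) d = stepB d p0 (levelB (c :: rest) d) := by
  unfold levelB
  rw [List.getLast?_cons_cons]
  cases h : (c :: rest).getLast? with
  | none => simp at h
  | some last =>
    simp only [List.dropLast_cons₂, List.reverse_cons, List.foldl_append, List.foldl_cons,
      List.foldl_nil]

theorem levelB_single (c : Char) (d : Int) :
    levelB [c] d = ['A', 'C', 'G', 'T'].map (fun x => ([x], if x = c then (0 : Int) else 1)) := by
  simp [levelB]

theorem levelB_main (s : List Char) (d : Int) (hd : d ≠ 0) (hs : s ≠ []) :
    (levelB s d).map (fun td => td.1) = neighborsA s d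
      ∧ ∀ td ∈ levelB s d, td.2 = pvHam s td.1 := by
  revert hs
  induction s with
  | nil => intro hs; exact absurd rfl hs
  | cons p0 tail ih =>
    intro _
    cases tail with
    | nil =>
      constructor
      · simp [levelB, neighborsA, hd]
      · intro td htd
        rw [levelB_single] at htd
        simp only [List.mem_map] at htd
        obtain ⟨x, hx, rfl⟩ := htd
        simp only [pvHam_cons]
        by_cases hxp : x = p0
        · simp [hxp, pvHam]
        · have hxp' : ¬ p0 = x := fun h => hxp h.symm
          simp [hxp, hxp', pvHam]
    | cons c rest =>
      obtain ⟨ih1, ih2⟩ := ih (by simp)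
      rw [levelB_cons]
      unfold stepB
      obtain ⟨g1, g2⟩ := stepB_go d p0 (c :: rest) (levelB (c :: rest) d) [] ih2
      constructor
      · rw [g1, ih1]
        conv_rhs => rw [neighborsA.eq_def]
        simp [hd]
      · exact g2 (by simp)

theorem neighbors_eq (p : List Char) (d : Int) (h : p ≠ [] ∨ d = 0) :
    neighborsA p d = neighborsB p d := by
  by_cases hd : d = 0
  · subst hd
    rw [neighborsA.eq_def]
    simp [neighborsB]
  · have hp : p ≠ [] := h.resolve_right hd
    rw [neighborsB, if_neg hd, (levelB_main p d hd hp).1]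

theorem add_guard (s : PySem.Set String) (x : String) :
    (if PySem.Set.contains s x then s else PySem.Set.add s x) = PySem.Set.add s x := by
  by_cases h : PySem.Set.contains s x <;> simp [PySem.Set.add, h]

-- ===== VERDICT (by name: the statement is the Claim_ definition above) =====
theorem motif_enumerate_spec : Claim_equal_motif_enumerate := by
  intro dna_list k d _ hpre
  unfold Spec_motif_enumerate motif_enumerate motif_enumerate_alt
  rcases hpre with hk | hd0 | hnil
  · -- 1 ≤ k : every window's k-mer is nonempty
    apply List.map_congr_left
    intro dna _
    apply PySem.List.foldl_congr_mem
    intro acc i hi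
    rw [PySem.List.mem_pyRange_one] at hi
    have hne : PySem.List.slice dna.toList (some i) (some (i + k)) ≠ [] := by
      rw [PySem.List.slice_of_nonneg dna.toList (by omega) (by omega) (by omega) (by omega)]
      apply List.ne_nil_of_length_pos
      simp only [List.length_take, List.length_drop]
      omega
    rw [neighbors_eq _ d (Or.inl hne)]
    apply PySem.List.foldl_congr_mem
    intro s nb _
    exact add_guard s (String.ofList nb)
  · -- d = 0
    apply List.map_congr_left
    intro dna _
    apply PySem.List.foldl_congr_mem
    intro acc i _
    rw [neighbors_eq _ d (Or.inr hd0)]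
    apply PySem.List.foldl_congr_mem
    intro s nb _
    exact add_guard s (String.ofList nb)
  · subst hnil
    rfl
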